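-- pv_equiv track=rewrite | github.com/jackwood1/woodfamily-ai | packages/core/bowling/casco_monday.py | _find_standings_header_index
-- ===== SOURCE A (Python) =====
-- from typing import Any, Dict, List, Optional
--
-- def _find_standings_header_index(rows: List[List[str]]) -> Optional[int]:
--     for idx, row in enumerate(rows):
--         lowered_cells = [cell.lower() for cell in row if cell]
--         if (
--             any("tm" in cell for cell in lowered_cells)
--             and any("name" in cell for cell in lowered_cells)
--             and any("captain" in cell for cell in lowered_cells)
--             and any("points" in cell for cell in lowered_cells)
--         ):
--             return idx
--     return None
-- ===== SOURCE B (Python) =====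
-- from typing import List, Optional
--
-- _KEYWORDS = ["tm", "name", "captain", "points"]
--
-- def _find_standings_header_index(rows: List[List[str]]) -> Optional[int]:
--     for idx, row in enumerate(rows):
--         missing = list(_KEYWORDS)
--         for cell in row:
--             if not cell:
--                 continue
--             c = cell.lower()
--             missing = [k for k in missing if k not in c]
--             if not missing:
--                 return idx
--     return None
-- ===== Notes on version B (the rewrite author's own statement) =====
-- stated objective: alternative
-- what changed: Replaces A's per-row lowered-cell list plus four independent any() scans with a shrinking worklist of still-missing keywords: each cell is tested only against keywords not yet found, the worklist is filtered down cell by cell, and the row (and function) exits early the moment the worklist empties mid-row.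
import Mathlib
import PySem

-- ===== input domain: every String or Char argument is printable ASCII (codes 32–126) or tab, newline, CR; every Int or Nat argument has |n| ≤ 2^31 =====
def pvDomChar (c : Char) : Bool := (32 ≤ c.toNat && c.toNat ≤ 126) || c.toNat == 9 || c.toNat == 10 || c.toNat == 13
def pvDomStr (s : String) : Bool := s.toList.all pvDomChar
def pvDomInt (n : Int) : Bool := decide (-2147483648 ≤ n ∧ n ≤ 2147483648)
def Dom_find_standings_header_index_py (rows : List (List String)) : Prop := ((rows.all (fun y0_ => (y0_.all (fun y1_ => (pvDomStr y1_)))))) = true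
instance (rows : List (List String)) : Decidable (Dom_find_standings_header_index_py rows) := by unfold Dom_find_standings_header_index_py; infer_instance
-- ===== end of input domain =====

-- B replaces A's per-row lowered list + four any() scans by a shrinking worklist of
-- still-missing keywords with early exit; return-value equivalence only.

-- ===== PORT A =====
-- lowered_cells = [cell.lower() for cell in row if cell]
def pvLoweredCells (row : List String) : List String :=
  (row.filter (fun c => !(c == ""))).map PySem.Str.lower

def pvGoA : List (List String) → Int → Option Int
  | [], _ => none
  | row :: rest, idx =>
    let low := pvLoweredCells row
    if low.any (fun c => PySem.Str.isIn "tm" c) && low.any (fun c => PySem.Str.isIn "name" c)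
        && low.any (fun c => PySem.Str.isIn "captain" c) && low.any (fun c => PySem.Str.isIn "points" c)
    then some idx
    else pvGoA rest (idx + 1)

def find_standings_header_index_py (rows : List (List String)) : Option Int :=
  pvGoA rows 0

-- ===== PORT B =====
def pvKeywords : List String := ["tm", "name", "captain", "points"]

-- inner loop: filter the worklist of missing keywords cell by cell, early exit when empty
def pvRowScan : List String → List String → Bool
  | [], missing => missing.isEmpty
  | cell :: rest, missing =>
    if cell == "" then pvRowScan rest missing
    else
      let c := PySem.Str.lower cell
      let m' := missing.filter (fun k => !(PySem.Str.isIn k c))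
      if m'.isEmpty then true else pvRowScan rest m'

def pvGoB : List (List String) → Int → Option Int
  | [], _ => none
  | row :: rest, idx =>
    if pvRowScan row pvKeywords then some idx else pvGoB rest (idx + 1)

def find_standings_header_index_py_alt (rows : List (List String)) : Option Int :=
  pvGoB rows 0

-- ===== PRECONDITION & SPEC =====
def Spec_find_standings_header_index_py (rows : List (List String)) (out : Option Int) : Prop := out = find_standings_header_index_py_alt rows
instance (rows : List (List String)) (out : Option Int) : Decidable (Spec_find_standings_header_index_py rows out) := by unfold Spec_find_standings_header_index_py; infer_instance

-- ===== CLAIM =====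
def Claim_equal_find_standings_header_index_py : Prop := ∀ (rows : List (List String)), Dom_find_standings_header_index_py rows → Spec_find_standings_header_index_py rows (find_standings_header_index_py rows)

-- ===== LEMMAS AND PROOFS =====

-- l.all (p ∨ q) = (l.filter ¬p).all q
theorem all_or_filter (l : List String) (p q : String → Bool) :
    l.all (fun k => p k || q k) = (l.filter (fun k => !p k)).all q := by
  induction l with
  | nil => rfl
  | cons k rest ih =>
    by_cases h : p k = true <;>
      simp only [List.all_cons, List.filter_cons, h, Bool.not_true, Bool.not_false,
        Bool.true_or, Bool.false_or, Bool.true_and, Bool.false_eq_true, if_false, if_true, ih]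

-- the worklist scan decides "every missing keyword occurs in some lowered truthy cell"
theorem pvRowScan_eq (row : List String) (missing : List String) :
    pvRowScan row missing =
      missing.all (fun k => (pvLoweredCells row).any (fun c => PySem.Str.isIn k c)) := by
  induction row generalizing missing with
  | nil => cases missing <;> simp [pvRowScan, pvLoweredCells]
  | cons cell rest ih =>
    by_cases h : cell = ""
    · simp [pvRowScan, pvLoweredCells, h, ih]
    · have hc : (cell == "") = false := by simp [h]
      have hl : pvLoweredCells (cell :: rest) = PySem.Str.lower cell :: pvLoweredCells rest := by
        simp [pvLoweredCells, h]
      simp only [pvRowScan, hc, hl, List.any_cons, Bool.false_eq_true, if_false]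
      rw [all_or_filter missing (fun k => PySem.Str.isIn k (PySem.Str.lower cell))
          (fun k => (pvLoweredCells rest).any fun c => PySem.Str.isIn k c)]
      by_cases he : (missing.filter (fun k => !(PySem.Str.isIn k (PySem.Str.lower cell)))).isEmpty = true
      · rw [if_pos he, List.isEmpty_iff.mp he]; rfl
      · rw [if_neg he, ih]

theorem pvGoA_eq_pvGoB (rows : List (List String)) (idx : Int) :
    pvGoA rows idx = pvGoB rows idx := by
  induction rows generalizing idx with
  | nil => rfl
  | cons row rest ih =>
    simp only [pvGoA, pvGoB, pvRowScan_eq, pvKeywords, List.all_cons, List.all_nil,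
      Bool.and_true]
    rw [Bool.and_assoc, Bool.and_assoc]
    split_ifs with h
    · rfl
    · exact ih _

-- ===== VERDICT =====
theorem find_standings_header_index_py_spec : Claim_equal_find_standings_header_index_py := by
  intro rows _
  unfold Spec_find_standings_header_index_py find_standings_header_index_py find_standings_header_index_py_alt
  exact pvGoA_eq_pvGoB rows 0
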